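-- pv_equiv track=rewrite | github.com/Peter-32/6_poker_reinforcement_learning | functions/identify_hand.py | is_oesd
-- ===== SOURCE A (Python) =====
-- def is_oesd(sorted_card_ranks_array):
--     sorted_card_ranks_array = sorted(list(set(sorted_card_ranks_array)))
--     chain = 0
--     previous = sorted_card_ranks_array[0]
--     for ele in sorted_card_ranks_array[1:]:
--         if ele == previous + 1:
--             chain += 1
--             if chain >= 3:
--                 return True
--         else:
--             chain = 0
--         previous = ele
--     # Double gutter:
--     for i in range(0,len(sorted_card_ranks_array)-4):
--         if sorted_card_ranks_array[i] == sorted_card_ranks_array[i+1] - 2 and sorted_card_ranks_array[i] == sorted_card_ranks_array[i+2] - 3 and sorted_card_ranks_array[i] == sorted_card_ranks_array[i+3] - 4 and sorted_card_ranks_array[i] == sorted_card_ranks_array[i+4] - 6: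
--             return True
--
--     return False
-- ===== SOURCE B (Python) =====
-- def is_oesd(sorted_card_ranks_array):
--     # set-membership reformulation: a 4-long consecutive run, or the
--     # double-gutter pattern r, r+2, r+3, r+4, r+6 with r+1 and r+5 absent
--     s = set(sorted_card_ranks_array)
--     if any(r + 1 in s and r + 2 in s and r + 3 in s for r in s):
--         return True
--     return any(r + 2 in s and r + 3 in s and r + 4 in s and r + 6 in s
--                and r + 1 not in s and r + 5 not in s for r in s)
-- ===== Notes on version B (the rewrite author's own statement) =====
-- stated objective: faster
-- what changed: Replaces the sort + chain-counter loop and the index-window double-gutter scan by pure set-membership tests on one hash set: 'any r with r+1,r+2,r+3 present' (open-ended run) or 'any r with r+2,r+3,r+4,r+6 present and r+1,r+5 absent' (double gutter); no sorting and no index arithmetic remain.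
-- outside the precondition, e.g. on is_oesd([]): A raises IndexError, B returns False
import Mathlib
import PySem

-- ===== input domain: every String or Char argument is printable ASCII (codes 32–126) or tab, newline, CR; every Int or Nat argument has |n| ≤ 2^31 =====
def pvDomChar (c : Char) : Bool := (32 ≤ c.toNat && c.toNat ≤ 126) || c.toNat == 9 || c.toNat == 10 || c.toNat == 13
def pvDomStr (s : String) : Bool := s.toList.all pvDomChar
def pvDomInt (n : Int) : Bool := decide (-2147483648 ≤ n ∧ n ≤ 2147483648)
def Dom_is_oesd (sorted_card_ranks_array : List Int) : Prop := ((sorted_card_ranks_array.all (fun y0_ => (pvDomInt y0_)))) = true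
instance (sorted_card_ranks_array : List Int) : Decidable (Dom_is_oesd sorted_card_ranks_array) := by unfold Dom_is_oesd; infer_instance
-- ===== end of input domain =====

-- B: set-membership reformulation (one hash set, two any() tests) instead of A's
-- sort + chain-counter loop + index-window double-gutter scan; equal on nonempty input,
-- A raises IndexError on [] where B returns False.


-- ===== PORT A =====
def isOesdChain (chain : Int) (previous : Int) : List Int → Bool
  | [] => false
  | ele :: rest =>
    if ele == previous + 1 then
      if chain + 1 ≥ 3 then true
      else isOesdChain (chain + 1) ele rest
    else isOesdChain 0 ele rest

def isOesdGutterBody (ranks : List Int) (i : Int) : Bool :=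
  match PySem.List.pyGet? ranks i, PySem.List.pyGet? ranks (i + 1), PySem.List.pyGet? ranks (i + 2),
        PySem.List.pyGet? ranks (i + 3), PySem.List.pyGet? ranks (i + 4) with
  | some a, some b, some c, some d, some e =>
      a == b - 2 && a == c - 3 && a == d - 4 && a == e - 6
  | _, _, _, _, _ => false

def is_oesd (sorted_card_ranks_array : List Int) : Bool :=
  let ranks := PySem.List.sorted (PySem.Set.ofList sorted_card_ranks_array) (fun x => x) false
  match ranks with
  | [] => false   -- unreachable under Pre_: Python raises IndexError reading ranks[0]
  | previous :: tail =>
    if isOesdChain 0 previous tail then true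
    else (PySem.List.pyRange 0 (((previous :: tail).length : Int) - 4) 1).any
           (isOesdGutterBody (previous :: tail))

-- ===== PORT B =====
def is_oesd_alt (sorted_card_ranks_array : List Int) : Bool :=
  let s := PySem.Set.ofList sorted_card_ranks_array
  if s.any (fun r => PySem.Set.contains s (r + 1) && PySem.Set.contains s (r + 2) &&
                     PySem.Set.contains s (r + 3)) then true
  else s.any (fun r => PySem.Set.contains s (r + 2) && PySem.Set.contains s (r + 3) &&
                       PySem.Set.contains s (r + 4) && PySem.Set.contains s (r + 6) &&
                       !(PySem.Set.contains s (r + 1)) && !(PySem.Set.contains s (r + 5)))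

-- ===== PRECONDITION & SPEC =====
-- Pre_ excludes exactly the empty list, on which A raises IndexError.
def Pre_is_oesd (sorted_card_ranks_array : List Int) : Prop := sorted_card_ranks_array ≠ []
instance (sorted_card_ranks_array : List Int) : Decidable (Pre_is_oesd sorted_card_ranks_array) := by unfold Pre_is_oesd; infer_instance
def pvWitness_is_oesd : List Int := ([2, 3, 4, 5])

def Spec_is_oesd (sorted_card_ranks_array : List Int) (out : Bool) : Prop := out = is_oesd_alt sorted_card_ranks_array
instance (sorted_card_ranks_array : List Int) (out : Bool) : Decidable (Spec_is_oesd sorted_card_ranks_array out) := by unfold Spec_is_oesd; infer_instance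

-- ===== CLAIM (what is proved, stated in full; the proofs are below) =====
def Claim_equal_is_oesd : Prop := ∀ (sorted_card_ranks_array : List Int), Dom_is_oesd sorted_card_ranks_array → Pre_is_oesd sorted_card_ranks_array → Spec_is_oesd sorted_card_ranks_array (is_oesd sorted_card_ranks_array)

-- ===== LEMMAS AND PROOFS =====

-- "needs n more consecutive successors of p, all present in L"
def pvRunB (L : List Int) (p : Int) : Nat → Bool
  | 0 => true
  | n + 1 => L.contains (p + 1) && pvRunB L (p + 1) n

def pvAnyRun (L : List Int) (rest : List Int) : Bool :=
  rest.any (fun r => L.contains (r + 1) && L.contains (r + 2) && L.contains (r + 3))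

lemma pvRunB_mono (L : List Int) : ∀ (n m : Nat) (p : Int), m ≤ n → pvRunB L p n = true → pvRunB L p m = true := by
  intro n
  induction n with
  | zero => intro m p hm h; interval_cases m; exact h
  | succ n ih =>
    intro m p hm h
    cases m with
    | zero => rfl
    | succ m =>
      simp only [pvRunB, Bool.and_eq_true] at h ⊢
      exact ⟨h.1, ih m (p + 1) (by omega) h.2⟩

lemma pvChain_eq (L : List Int) :
    ∀ (rest : List Int) (prev : Int) (c : Int) (n : Nat), 0 ≤ c → c + n = 3 → 1 ≤ n →
      (∀ x ∈ L, prev < x → x ∈ rest) → (∀ x ∈ rest, x ∈ L) → (prev :: rest).Pairwise (· < ·) →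
      isOesdChain c prev rest = (pvRunB L prev n || pvAnyRun L rest) := by
  intro rest
  induction rest with
  | nil =>
    intro prev c n hc hcn hn hfwd hsub hsort
    obtain ⟨m, rfl⟩ : ∃ m, n = m + 1 := ⟨n - 1, by omega⟩
    have hcon : L.contains (prev + 1) = false := by
      by_contra h
      have : prev + 1 ∈ L := by
        have := Bool.of_not_eq_false h
        simpa using this
      exact absurd (hfwd _ this (by omega)) (List.not_mem_nil)
    have h0 : pvRunB L prev (m + 1) = false := by
      simp only [pvRunB, hcon, Bool.false_and]
    simp [isOesdChain, pvAnyRun, h0]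
  | cons ele rest' ih =>
    intro prev c n hc hcn hn hfwd hsub hsort
    have hpe : prev < ele := (List.pairwise_cons.mp hsort).1 ele (by simp)
    have hsort' : (ele :: rest').Pairwise (· < ·) := (List.pairwise_cons.mp hsort).2
    have heleL : ele ∈ L := hsub ele (by simp)
    by_cases he : ele = prev + 1
    · obtain ⟨m, rfl⟩ : ∃ m, n = m + 1 := ⟨n - 1, by omega⟩
      have hconp : L.contains (prev + 1) = true := by
        simp [← he, heleL]
      by_cases h3 : c + 1 ≥ 3
      · have hm : m = 0 := by omega
        subst hm
        have h1 : pvRunB L prev 1 = true := by simp only [pvRunB, hconp, Bool.and_self]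
        simp [isOesdChain, he, h3, h1]
      · have hm : 1 ≤ m := by omega
        have ihres := ih ele (c + 1) m (by omega) (by omega) hm
          (fun x hx hlt => by
            have hx' : x ∈ ele :: rest' := hfwd x hx (by omega)
            rcases List.mem_cons.mp hx' with h | h
            · omega
            · exact h)
          (fun x hx => hsub x (by simp [hx])) hsort'
        have step : isOesdChain c prev (ele :: rest') = isOesdChain (c + 1) ele rest' := by
          simp [isOesdChain, he, h3]
        rw [step, ihres]
        -- RHS: pvRunB L prev (m+1) = contains(prev+1) && pvRunB L ele m; absorb run3 ele
        have hrw : pvRunB L prev (m + 1) = pvRunB L ele m := by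
          rw [pvRunB, hconp, Bool.true_and, ← he]
        rw [hrw]
        simp only [pvAnyRun, List.any_cons]
        by_cases hr3 : (L.contains (ele + 1) && L.contains (ele + 2) && L.contains (ele + 3)) = true
        · have hrun3 : pvRunB L ele 3 = true := by
            simp only [Bool.and_eq_true, List.contains_iff_mem] at hr3
            simp only [pvRunB, show ele + 1 + 1 = ele + 2 from by ring,
              show ele + 2 + 1 = ele + 3 from by ring]
            simp [hr3.1.1, hr3.1.2, hr3.2]
          have hm' : pvRunB L ele m = true := pvRunB_mono L 3 m ele (by omega) hrun3
          rw [hm']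
          simp
        · simp only [Bool.not_eq_true] at hr3
          rw [hr3, Bool.false_or]
    · -- gap: chain resets
      have hfwd' : ∀ x ∈ L, ele < x → x ∈ rest' := fun x hx hlt => by
        have hx' : x ∈ ele :: rest' := hfwd x hx (by omega)
        rcases List.mem_cons.mp hx' with h | h
        · omega
        · exact h
      have ihres := ih ele 0 3 (by omega) (by omega) (by omega) hfwd'
        (fun x hx => hsub x (by simp [hx])) hsort'
      have step : isOesdChain c prev (ele :: rest') = isOesdChain 0 ele rest' := by
        simp [isOesdChain, he]
      have hconp : L.contains (prev + 1) = false := by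
        by_contra h
        have hmem : prev + 1 ∈ L := by
          have := Bool.of_not_eq_false h
          simpa using this
        have hmc : prev + 1 ∈ ele :: rest' := hfwd _ hmem (by omega)
        rcases List.mem_cons.mp hmc with h | h
        · omega
        · have : ele < prev + 1 := (List.pairwise_cons.mp hsort').1 _ h
          omega
      obtain ⟨m, rfl⟩ : ∃ m, n = m + 1 := ⟨n - 1, by omega⟩
      rw [step, ihres]
      have h0 : pvRunB L prev (m + 1) = false := by
        rw [pvRunB, hconp, Bool.false_and]
      have h3 : pvRunB L ele 3 = (L.contains (ele + 1) && L.contains (ele + 2) && L.contains (ele + 3)) := by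
        simp [pvRunB]
        ac_rfl
      rw [h0, h3]
      simp only [pvAnyRun, List.any_cons]
      rw [Bool.false_or]

lemma pvNoBetween (L : List Int) (hL : L.Pairwise (· < ·)) (i : Nat) (hi1 : i + 1 < L.length)
    (x : Int) (hx : x ∈ L) (h1 : L[i] < x) (h2 : x < L[i + 1]) : False := by
  have hpw := List.pairwise_iff_getElem.mp hL
  obtain ⟨j, hj, rfl⟩ := List.mem_iff_getElem.mp hx
  rcases lt_trichotomy j i with h | h | h
  · exact absurd (hpw j i hj (by omega) h) (by omega)
  · subst h; omega
  · rcases lt_trichotomy j (i + 1) with h' | h' | h'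
    · omega
    · subst h'; omega
    · exact absurd (hpw (i + 1) j hi1 hj h') (by omega)

lemma pvSucc (L : List Int) (hL : L.Pairwise (· < ·)) (i : Nat) (hi : i < L.length)
    (y : Int) (hy : y ∈ L) (hlt : L[i] < y)
    (hno : ∀ z, L[i] < z → z < y → z ∉ L) :
    ∃ h : i + 1 < L.length, L[i + 1]'h = y := by
  have hpw := List.pairwise_iff_getElem.mp hL
  obtain ⟨j, hj, rfl⟩ := List.mem_iff_getElem.mp hy
  have hij : i < j := by
    by_contra h
    rcases Nat.lt_or_ge j i with h' | h'
    · exact absurd (hpw j i hj hi h') (by omega)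
    · have : j = i := by omega
      subst this; omega
  have hi1 : i + 1 < L.length := by omega
  refine ⟨hi1, ?_⟩
  rcases lt_trichotomy (L[i + 1]'hi1) (L[j]'hj) with h | h | h
  · exact absurd (List.getElem_mem hi1)
      (hno _ (hpw i (i + 1) hi hi1 (by omega)) h)
  · exact h
  · rcases Nat.lt_or_ge (i + 1) j with h' | h'
    · exact absurd (hpw (i + 1) j hi1 hj h') (by omega)
    · have : j = i + 1 := by omega
      subst this; omega

lemma pvGutter_eq (L : List Int) (hL : L.Pairwise (· < ·)) :
    ((PySem.List.pyRange 0 ((L.length : Int) - 4) 1).any (isOesdGutterBody L))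
      = L.any (fun r => L.contains (r + 2) && L.contains (r + 3) && L.contains (r + 4) &&
          L.contains (r + 6) && !(L.contains (r + 1)) && !(L.contains (r + 5))) := by
  rw [Bool.eq_iff_iff]
  simp only [List.any_eq_true, Bool.and_eq_true, List.contains_eq_mem,
    decide_eq_true_eq, Bool.not_eq_eq_eq_not, Bool.not_true, decide_eq_false_iff_not]
  constructor
  · rintro ⟨i, hi, hbody⟩
    obtain ⟨h0, hlt⟩ := (PySem.List.mem_pyRange_one).mp hi
    obtain ⟨k, rfl⟩ : ∃ k : Nat, i = (k : Int) := ⟨i.toNat, (Int.toNat_of_nonneg h0).symm⟩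
    have hklen : k + 4 < L.length := by omega
    have g0 : PySem.List.pyGet? L (k : Int) = some (L[k]'(by omega)) := by
      rw [PySem.List.pyGet?_natCast]; exact List.getElem?_eq_getElem (by omega)
    have g1 : PySem.List.pyGet? L ((k : Int) + 1) = some (L[k + 1]'(by omega)) := by
      rw [show ((k : Int) + 1) = ((k + 1 : Nat) : Int) from by push_cast; ring,
        PySem.List.pyGet?_natCast]
      exact List.getElem?_eq_getElem (by omega)
    have g2 : PySem.List.pyGet? L ((k : Int) + 2) = some (L[k + 2]'(by omega)) := by
      rw [show ((k : Int) + 2) = ((k + 2 : Nat) : Int) from by push_cast; ring,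
        PySem.List.pyGet?_natCast]
      exact List.getElem?_eq_getElem (by omega)
    have g3 : PySem.List.pyGet? L ((k : Int) + 3) = some (L[k + 3]'(by omega)) := by
      rw [show ((k : Int) + 3) = ((k + 3 : Nat) : Int) from by push_cast; ring,
        PySem.List.pyGet?_natCast]
      exact List.getElem?_eq_getElem (by omega)
    have g4 : PySem.List.pyGet? L ((k : Int) + 4) = some (L[k + 4]'(by omega)) := by
      rw [show ((k : Int) + 4) = ((k + 4 : Nat) : Int) from by push_cast; ring,
        PySem.List.pyGet?_natCast]
      exact List.getElem?_eq_getElem (by omega)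
    rw [isOesdGutterBody, g0, g1, g2, g3, g4] at hbody
    simp only [Bool.and_eq_true, beq_iff_eq] at hbody
    obtain ⟨⟨⟨e1, e2⟩, e3⟩, e4⟩ := hbody
    refine ⟨L[k]'(by omega), List.getElem_mem _, ⟨⟨⟨⟨?_, ?_⟩, ?_⟩, ?_⟩, ?_⟩, ?_⟩
    · rw [show L[k]'(by omega) + 2 = L[k + 1]'(by omega) from by omega]
      exact List.getElem_mem _
    · rw [show L[k]'(by omega) + 3 = L[k + 2]'(by omega) from by omega]
      exact List.getElem_mem _
    · rw [show L[k]'(by omega) + 4 = L[k + 3]'(by omega) from by omega]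
      exact List.getElem_mem _
    · rw [show L[k]'(by omega) + 6 = L[k + 4]'(by omega) from by omega]
      exact List.getElem_mem _
    · intro hmem
      exact pvNoBetween L hL k (by omega) _ hmem (by omega) (by omega)
    · intro hmem
      have enorm : L[k + 3 + 1]'(by omega) = L[k + 4]'(by omega) := rfl
      refine pvNoBetween L hL (k + 3) (by omega) _ hmem (by omega) ?_
      rw [enorm]; omega
  · rintro ⟨r, hr, ⟨⟨⟨⟨h2, h3⟩, h4⟩, h6⟩, h1⟩, h5⟩
    obtain ⟨k, hk, rfl⟩ := List.mem_iff_getElem.mp hr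
    obtain ⟨hk1, e1⟩ := pvSucc L hL k hk _ h2 (by omega)
      (fun z hz1 hz2 hzm => h1 (by rw [show (L[k]'hk) + 1 = z from by omega]; exact hzm))
    obtain ⟨hk2, e2⟩ := pvSucc L hL (k + 1) hk1 _ h3 (by rw [e1]; omega)
      (fun z hz1 hz2 hzm => by rw [e1] at hz1; omega)
    have hk2' : k + 2 < L.length := hk2
    have e2' : L[k + 2]'hk2' = L[k]'hk + 3 := e2
    clear e2 hk2
    obtain ⟨hk3, e3⟩ := pvSucc L hL (k + 2) hk2' _ h4 (by rw [e2']; omega)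
      (fun z hz1 hz2 hzm => by rw [e2'] at hz1; omega)
    have hk3' : k + 3 < L.length := hk3
    have e3' : L[k + 3]'hk3' = L[k]'hk + 4 := e3
    clear e3 hk3
    obtain ⟨hk4, e4⟩ := pvSucc L hL (k + 3) hk3' _ h6 (by rw [e3']; omega)
      (fun z hz1 hz2 hzm => by
        rw [e3'] at hz1
        exact h5 (by rw [show (L[k]'hk) + 5 = z from by omega]; exact hzm))
    have hk4' : k + 4 < L.length := hk4
    have e4' : L[k + 4]'hk4' = L[k]'hk + 6 := e4
    clear e4 hk4
    refine ⟨(k : Int), ?_, ?_⟩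
    · rw [PySem.List.mem_pyRange_one]
      constructor
      · omega
      · omega
    · have g0 : PySem.List.pyGet? L (k : Int) = some (L[k]'hk) := by
        rw [PySem.List.pyGet?_natCast]; exact List.getElem?_eq_getElem hk
      have g1 : PySem.List.pyGet? L ((k : Int) + 1) = some (L[k + 1]'hk1) := by
        rw [show ((k : Int) + 1) = ((k + 1 : Nat) : Int) from by push_cast; ring,
          PySem.List.pyGet?_natCast]
        exact List.getElem?_eq_getElem hk1
      have g2 : PySem.List.pyGet? L ((k : Int) + 2) = some (L[k + 2]'hk2') := by
        rw [show ((k : Int) + 2) = ((k + 2 : Nat) : Int) from by push_cast; ring,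
          PySem.List.pyGet?_natCast]
        exact List.getElem?_eq_getElem hk2'
      have g3 : PySem.List.pyGet? L ((k : Int) + 3) = some (L[k + 3]'hk3') := by
        rw [show ((k : Int) + 3) = ((k + 3 : Nat) : Int) from by push_cast; ring,
          PySem.List.pyGet?_natCast]
        exact List.getElem?_eq_getElem hk3'
      have g4 : PySem.List.pyGet? L ((k : Int) + 4) = some (L[k + 4]'hk4') := by
        rw [show ((k : Int) + 4) = ((k + 4 : Nat) : Int) from by push_cast; ring,
          PySem.List.pyGet?_natCast]
        exact List.getElem?_eq_getElem hk4'
      rw [isOesdGutterBody, g0, g1, g2, g3, g4]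
      simp only [Bool.and_eq_true, beq_iff_eq]
      refine ⟨⟨⟨?_, ?_⟩, ?_⟩, ?_⟩ <;> omega

theorem is_oesd_spec : Claim_equal_is_oesd := by
  intro xs _ hpre
  show is_oesd xs = is_oesd_alt xs
  simp only [is_oesd, is_oesd_alt]
  set s := PySem.Set.ofList xs with hsdef
  set L := PySem.List.sorted s (fun x => x) false with hLdef
  have hmemL : ∀ x : Int, x ∈ L ↔ x ∈ xs := by
    intro x
    rw [hLdef, PySem.List.mem_sorted]
    exact PySem.Set.mem_ofList xs x
  have hmems : ∀ x : Int, x ∈ s ↔ x ∈ xs := fun x => PySem.Set.mem_ofList xs x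
  have hnd : L.Nodup := ((PySem.List.sorted_perm _ _ _).nodup_iff).mpr (PySem.Set.nodup_ofList xs)
  have hle : L.Pairwise (fun a b => a ≤ b) := PySem.List.sorted_pairwise _ _
  have hL : L.Pairwise (· < ·) := by
    have hand := List.Pairwise.and hle hnd
    exact hand.imp (fun h => lt_of_le_of_ne h.1 h.2)
  have hLne : L ≠ [] := by
    obtain ⟨a, ha⟩ := List.exists_mem_of_ne_nil xs hpre
    intro hnil
    rw [hnil] at hmemL
    exact absurd ((hmemL a).mpr ha) (List.not_mem_nil)
  obtain ⟨p, t, hLpt⟩ := List.exists_cons_of_ne_nil hLne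
  have hsub : ∀ x ∈ t, x ∈ L := fun x hx => by rw [hLpt]; exact List.mem_cons_of_mem _ hx
  have hrun_iff : ∀ q : Int, pvRunB L q 3 = true ↔ (q + 1 ∈ L ∧ q + 2 ∈ L ∧ q + 3 ∈ L) := by
    intro q
    simp only [pvRunB, show q + 1 + 1 = q + 2 from by ring, show q + 2 + 1 = q + 3 from by ring,
      Bool.and_true, Bool.and_eq_true, List.contains_eq_mem, decide_eq_true_eq]
  have hchain : isOesdChain 0 p t = s.any (fun r => PySem.Set.contains s (r + 1) &&
      PySem.Set.contains s (r + 2) && PySem.Set.contains s (r + 3)) := by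
    rw [pvChain_eq L t p 0 3 (by omega) (by norm_num) (by omega)
      (fun x hx hlt => by
        rw [hLpt] at hx
        rcases List.mem_cons.mp hx with h | h
        · omega
        · exact h)
      hsub (hLpt ▸ hL)]
    rw [Bool.eq_iff_iff]
    simp only [pvAnyRun, Bool.or_eq_true, List.any_eq_true, Bool.and_eq_true,
      List.contains_eq_mem, decide_eq_true_eq, PySem.Set.contains, hrun_iff, hmemL, hmems,
      and_assoc]
    constructor
    · rintro (⟨m1, m2, m3⟩ | ⟨r, hr, h⟩)
      · exact ⟨p, (hmemL p).mp (hLpt ▸ List.mem_cons_self), m1, m2, m3⟩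
      · exact ⟨r, (hmemL r).mp (hsub r hr), h⟩
    · rintro ⟨r, hr, h1, h2, h3⟩
      have hrL : r ∈ L := (hmemL r).mpr hr
      rw [hLpt] at hrL
      rcases List.mem_cons.mp hrL with h | h
      · subst h; exact Or.inl ⟨h1, h2, h3⟩
      · exact Or.inr ⟨r, h, h1, h2, h3⟩
  have hgut : ((PySem.List.pyRange 0 ((L.length : Int) - 4) 1).any (isOesdGutterBody L))
      = s.any (fun r => PySem.Set.contains s (r + 2) && PySem.Set.contains s (r + 3) &&
          PySem.Set.contains s (r + 4) && PySem.Set.contains s (r + 6) &&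
          !(PySem.Set.contains s (r + 1)) && !(PySem.Set.contains s (r + 5))) := by
    rw [pvGutter_eq L hL, Bool.eq_iff_iff]
    simp only [List.any_eq_true, Bool.and_eq_true, List.contains_eq_mem,
      decide_eq_true_eq, Bool.not_eq_eq_eq_not, Bool.not_true, decide_eq_false_iff_not,
      PySem.Set.contains, hmemL, hmems, and_assoc]
  rw [hLpt]
  simp only []
  rw [hchain, ← hLpt, hgut]
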